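-- pv_equiv track=rewrite | github.com/montoliu/SimularMemoriaCache | utils.py | fancy_binario
-- ===== SOURCE A (Python) =====
-- def fancy_binario(numero):
--     s = ""
--     i = 0
--     for bit in numero:
--         s = s + bit
--         i += 1
--         if i % 4 == 0:
--             s = s + " "
--     return s
-- ===== SOURCE B (Python) =====
-- def fancy_binario(numero):
--     out = ''
--     while len(numero) >= 4:
--         out += numero[:4] + ' '
--         numero = numero[4:]
--     return out + numero
-- ===== Notes on version B (the rewrite author's own statement) =====
-- stated objective: simpler
-- what changed: Replaces A's per-character accumulation with a modulo-4 counter by chunk-wise slicing: a loop that peels off numero[:4] plus a space while at least 4 characters remain and appends the short remainder as-is (preserving A's trailing space on multiple-of-4 lengths).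
import Mathlib
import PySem

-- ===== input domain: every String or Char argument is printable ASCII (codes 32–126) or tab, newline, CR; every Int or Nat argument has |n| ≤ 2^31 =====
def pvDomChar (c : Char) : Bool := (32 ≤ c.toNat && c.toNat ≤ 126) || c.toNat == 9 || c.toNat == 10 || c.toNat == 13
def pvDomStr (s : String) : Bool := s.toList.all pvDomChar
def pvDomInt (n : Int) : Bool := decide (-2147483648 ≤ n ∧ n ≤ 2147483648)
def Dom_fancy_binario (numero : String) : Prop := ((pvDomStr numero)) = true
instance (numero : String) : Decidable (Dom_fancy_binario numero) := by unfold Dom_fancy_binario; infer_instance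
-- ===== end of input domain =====

-- B groups the string into 4-character chunks by recursion instead of A's per-character counter loop; simpler, same result.

-- ===== PORT A =====
-- the for-loop over the characters, state (s, i), transcribed literally
def pvLoopA : List Char → List Char → Int → List Char
  | [], s, _ => s
  | bit :: rest, s, i =>
      let s1 := s ++ [bit]
      let i1 := i + 1
      pvLoopA rest (if PySem.Int.mod i1 4 == 0 then s1 ++ [' '] else s1) i1

def fancy_binario (numero : String) : String :=
  String.ofList (pvLoopA numero.toList [] 0)

-- ===== PORT B =====
-- the while loop, state (out, numero); numero[:4] = take 4, numero[4:] = drop 4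
-- (PySem.List.slice_to / slice_from, exact for nonnegative bounds)
def pvChunk (out : List Char) (numero : List Char) : List Char :=
  if numero.length ≥ 4 then pvChunk (out ++ numero.take 4 ++ [' ']) (numero.drop 4)
  else out ++ numero
  termination_by numero.length
  decreasing_by rw [List.length_drop]; omega

def fancy_binario_alt (numero : String) : String :=
  String.ofList (pvChunk [] numero.toList)

-- ===== PRECONDITION & SPEC =====
def Spec_fancy_binario (numero : String) (out : String) : Prop := out = fancy_binario_alt numero
instance (numero : String) (out : String) : Decidable (Spec_fancy_binario numero out) := by unfold Spec_fancy_binario; infer_instance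

-- ===== CLAIM (what is proved, stated in full; the proofs are below) =====
def Claim_equal_fancy_binario : Prop := ∀ (numero : String), Dom_fancy_binario numero → Spec_fancy_binario numero (fancy_binario numero)

-- ===== LEMMAS AND PROOFS =====

theorem pvLoopA_eq_chunk : ∀ n (xs acc : List Char) (i : Int),
    xs.length ≤ n → 0 ≤ i → i % 4 = 0 → pvLoopA xs acc i = pvChunk acc xs := by
  intro n
  induction n with
  | zero =>
    intro xs acc i hlen _ _
    have : xs = [] := List.eq_nil_of_length_eq_zero (Nat.le_zero.mp hlen)
    subst this
    simp [pvLoopA, pvChunk]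
  | succ n ih =>
    intro xs acc i hlen hnn hmod
    have hm : ∀ j : Int, 0 ≤ j → PySem.Int.mod j 4 = j % 4 :=
      fun j _ => PySem.Int.mod_eq_emod_of_pos (by omega)
    match xs with
    | [] => rw [pvChunk]; simp [pvLoopA]
    | [a] =>
      have : (i + 1) % 4 ≠ 0 := by omega
      rw [pvChunk]
      simp only [pvLoopA]
      rw [hm (i+1) (by omega)]
      simp [this]
    | [a, b] =>
      have h1 : (i + 1) % 4 ≠ 0 := by omega
      have h2 : (i + 1 + 1) % 4 ≠ 0 := by omega
      rw [pvChunk]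
      simp only [pvLoopA]
      rw [hm (i+1) (by omega), hm (i+1+1) (by omega)]
      simp [h1, h2]
    | [a, b, c] =>
      have h1 : (i + 1) % 4 ≠ 0 := by omega
      have h2 : (i + 1 + 1) % 4 ≠ 0 := by omega
      have h3 : (i + 1 + 1 + 1) % 4 ≠ 0 := by omega
      rw [pvChunk]
      simp only [pvLoopA]
      rw [hm (i+1) (by omega), hm (i+1+1) (by omega), hm (i+1+1+1) (by omega)]
      simp [h1, h2, h3]
    | a :: b :: c :: d :: rest =>
      simp only [pvLoopA]
      rw [hm (i+1) (by omega), hm (i+1+1) (by omega), hm (i+1+1+1) (by omega),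
        hm (i+1+1+1+1) (by omega)]
      have h1 : (i + 1) % 4 ≠ 0 := by omega
      have h2 : (i + 1 + 1) % 4 ≠ 0 := by omega
      have h3 : (i + 1 + 1 + 1) % 4 ≠ 0 := by omega
      have h4 : (i + 1 + 1 + 1 + 1) % 4 = 0 := by omega
      simp only [h1, h2, h3, h4, beq_iff_eq, if_true, if_false]
      have hrest : rest.length ≤ n := by simp at hlen; omega
      rw [ih rest _ (i+1+1+1+1) hrest (by omega) h4]
      conv_rhs => rw [pvChunk]
      have hlong : (a :: b :: c :: d :: rest).length ≥ 4 := by simp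
      rw [if_pos hlong]
      simp

theorem fancy_binario_spec : Claim_equal_fancy_binario := by
  intro numero _
  unfold Spec_fancy_binario fancy_binario fancy_binario_alt
  rw [pvLoopA_eq_chunk numero.toList.length numero.toList [] 0 le_rfl le_rfl rfl]

-- ===== VERDICT (by name: the statement is the Claim_ definition above) =====
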